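-- pv_equiv track=rewrite | github.com/deepria/BAEKJOON_Py | 랜덤 마라톤/202504/20250409/3863_행복한 전화 통화.py | process_test_case
-- ===== SOURCE A (Python) =====
-- def process_test_case(calls, intervals):
--     results = []
--     for interval_start, interval_duration in intervals:
--         interval_end = interval_start + interval_duration
--         count = 0
--         for call_start, call_duration in calls:
--             call_end = call_start + call_duration
--             if call_start < interval_end and call_end > interval_start:
--                 count += 1
--         results.append(count)
--     return results
-- ===== SOURCE B (Python) =====
-- def process_test_case(calls, intervals):
--     # Offline sweep line: calls sorted by start; queries processed in order of
--     # interval end with one monotone pointer moving each call's end into the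
--     # active pool exactly once; answers are scattered back by original index.
--     pending = sorted(calls, key=lambda c: c[0])
--     order = sorted(range(len(intervals)),
--                    key=lambda i: intervals[i][0] + intervals[i][1])
--     results = [0] * len(intervals)
--     ends = []
--     for i in order:
--         s, d = intervals[i]
--         e = s + d
--         while pending and pending[0][0] < e:
--             cs, cd = pending.pop(0)
--             ends.append(cs + cd)
--         results[i] = sum(1 for x in ends if x > s)
--     return results
-- ===== Notes on version B (the rewrite author's own statement) =====
-- stated objective: faster
-- what changed: Replaces A's per-pair overlap tests with an offline sweep line: calls are sorted by start, queries are processed in nondecreasing order of interval end with one monotone pointer that moves each call's end into the active pool exactly once, each answer counts late ends in the active pool and is scattered back to its original index.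
import Mathlib
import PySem

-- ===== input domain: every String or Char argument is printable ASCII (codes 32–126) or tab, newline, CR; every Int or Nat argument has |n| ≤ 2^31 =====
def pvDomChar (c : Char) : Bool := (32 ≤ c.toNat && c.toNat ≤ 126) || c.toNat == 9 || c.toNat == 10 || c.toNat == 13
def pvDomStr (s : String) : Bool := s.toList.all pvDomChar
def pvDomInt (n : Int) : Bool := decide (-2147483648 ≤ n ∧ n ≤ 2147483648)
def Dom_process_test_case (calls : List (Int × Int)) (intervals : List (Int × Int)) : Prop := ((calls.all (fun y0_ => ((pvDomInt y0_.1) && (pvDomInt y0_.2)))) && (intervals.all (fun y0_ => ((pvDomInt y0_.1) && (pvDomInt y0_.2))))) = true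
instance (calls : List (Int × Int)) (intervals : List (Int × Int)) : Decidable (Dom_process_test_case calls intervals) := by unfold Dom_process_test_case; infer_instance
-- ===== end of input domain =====

-- B replaces A's per-pair overlap tests with an offline sweep line (calls sorted by
-- start, queries by interval end, one monotone pointer, answers scattered back by
-- index); equivalence of the two is proved for all inputs (both are total).

-- ===== PORT A =====
-- port of A: interval-major nested loops, result list built by append
def process_test_case (calls : List (Int × Int)) (intervals : List (Int × Int)) : List Int :=
  intervals.foldl (fun results iv =>
    let interval_end := iv.1 + iv.2
    let count : Int := calls.foldl (fun count c =>
      let call_end := c.1 + c.2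
      if c.1 < interval_end ∧ call_end > iv.1 then count + 1 else count) 0
    results ++ [count]) []

-- ===== PORT B =====
-- the inner 'while pending and pending[0][0] < e: pop(0); ends.append(end)' loop
def pvSweep (e : Int) : List (Int × Int) → List Int → List (Int × Int) × List Int
  | [], ends => ([], ends)
  | c :: rest, ends => if c.1 < e then pvSweep e rest (ends ++ [c.1 + c.2]) else (c :: rest, ends)

-- the body of B's 'for i in order' loop; state = (pending, ends, results)
-- (intervals[i] is ported with pyGetD (0,0): i always comes from range(len(intervals)))
def pvStep (intervals : List (Int × Int)) (st : List (Int × Int) × List Int × List Int) (i : Int) :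
    List (Int × Int) × List Int × List Int :=
  let iv := PySem.List.pyGetD intervals i (0, 0)
  let e := iv.1 + iv.2
  let sw := pvSweep e st.1 st.2.1
  (sw.1, sw.2,
    PySem.List.pySetD st.2.2 i (sw.2.foldl (fun acc x => if x > iv.1 then acc + 1 else acc) (0 : Int)))

-- port of B: offline sweep line over queries sorted by interval end
def process_test_case_alt (calls : List (Int × Int)) (intervals : List (Int × Int)) : List Int :=
  let pending := PySem.List.sorted calls (fun c => c.1) false
  let order := PySem.List.sorted (PySem.List.pyRange 0 intervals.length 1)
    (fun i => (PySem.List.pyGetD intervals i (0, 0)).1 + (PySem.List.pyGetD intervals i (0, 0)).2) false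
  (order.foldl (pvStep intervals) (pending, [], List.replicate intervals.length (0 : Int))).2.2

-- ===== PRECONDITION & SPEC =====
def Spec_process_test_case (calls : List (Int × Int)) (intervals : List (Int × Int)) (out : List Int) : Prop := out = process_test_case_alt calls intervals
instance (calls : List (Int × Int)) (intervals : List (Int × Int)) (out : List Int) : Decidable (Spec_process_test_case calls intervals out) := by unfold Spec_process_test_case; infer_instance

-- ===== CLAIM (what is proved, stated in full; the proofs are below) =====
def Claim_equal_process_test_case : Prop := ∀ (calls : List (Int × Int)) (intervals : List (Int × Int)), Dom_process_test_case calls intervals → Spec_process_test_case calls intervals (process_test_case calls intervals)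

-- ===== LEMMAS AND PROOFS =====

-- the end-sort key used for 'order'
def pvKey (intervals : List (Int × Int)) (i : Int) : Int :=
  (PySem.List.pyGetD intervals i (0, 0)).1 + (PySem.List.pyGetD intervals i (0, 0)).2

-- the order-independent value B stores at index i
def pvVal (calls intervals : List (Int × Int)) (i : Int) : Int :=
  let iv := PySem.List.pyGetD intervals i (0, 0)
  ((((PySem.List.sorted calls (fun c => c.1) false).takeWhile
      (fun c => decide (c.1 < iv.1 + iv.2))).map (fun c => c.1 + c.2)).countP
      (fun x => decide (x > iv.1)) : Int)

lemma pvSweep_spec (e : Int) (pending : List (Int × Int)) :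
    ∀ ends, pvSweep e pending ends =
      (pending.dropWhile (fun c => decide (c.1 < e)),
       ends ++ (pending.takeWhile (fun c => decide (c.1 < e))).map (fun c => c.1 + c.2)) := by
  induction pending with
  | nil => intro ends; simp [pvSweep]
  | cons c rest ih =>
      intro ends
      by_cases h : c.1 < e
      · simp [pvSweep, h, List.dropWhile, List.takeWhile, ih]
      · simp [pvSweep, h, List.dropWhile, List.takeWhile]

lemma pv_takeWhile_split {α : Type} (p q : α → Bool) (h : ∀ x, p x = true → q x = true) :
    ∀ l : List α, l.takeWhile q = l.takeWhile p ++ (l.dropWhile p).takeWhile q := by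
  intro l
  induction l with
  | nil => simp
  | cons a t ih =>
      by_cases hp : p a = true
      · simp [List.takeWhile, List.dropWhile, hp, h a hp, ih]
      · simp [List.takeWhile, List.dropWhile, hp]

lemma pv_dropWhile_split {α : Type} (p q : α → Bool) (h : ∀ x, p x = true → q x = true) :
    ∀ l : List α, l.dropWhile q = (l.dropWhile p).dropWhile q := by
  intro l
  induction l with
  | nil => simp
  | cons a t ih =>
      by_cases hp : p a = true
      · simp [List.dropWhile, hp, h a hp, ih]
      · simp [List.dropWhile, hp]

lemma pv_takeWhile_eq_filter (e : Int) :
    ∀ l : List (Int × Int), l.Pairwise (fun a b => a.1 ≤ b.1) →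
      l.takeWhile (fun c => decide (c.1 < e)) = l.filter (fun c => decide (c.1 < e)) := by
  intro l
  induction l with
  | nil => simp
  | cons a t ih =>
      intro hp
      rw [List.pairwise_cons] at hp
      by_cases h : a.1 < e
      · simp [List.takeWhile, List.filter, h, ih hp.2]
      · have hnone : t.filter (fun c => decide (c.1 < e)) = [] := by
          rw [List.filter_eq_nil_iff]
          intro x hx
          simp only [decide_eq_true_eq]
          have := hp.1 x hx
          omega
        simp [List.takeWhile, List.filter, h, hnone]

-- a fold of in-range assignments whose stored value depends only on the index
lemma pv_foldl_setD_getD (v : Int → Int) :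
    ∀ (order : List Int) (res : List Int),
      (∀ i ∈ order, 0 ≤ i ∧ i < (res.length : Int)) →
      (order.foldl (fun r i => PySem.List.pySetD r i (v i)) res).length = res.length ∧
      ∀ j : Nat, (order.foldl (fun r i => PySem.List.pySetD r i (v i)) res)[j]?.getD 0 =
        if (j : Int) ∈ order then v j else res[j]?.getD 0 := by
  intro order
  induction order with
  | nil => intro res _; simp
  | cons i rest ih =>
      intro res hr
      obtain ⟨hi0, hilt⟩ := hr i (by simp)
      have hset : PySem.List.pySetD res i (v i) = res.set i.toNat (v i) :=
        PySem.List.pySetD_of_nonneg res (v i) hi0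
      have hlen2 : (PySem.List.pySetD res i (v i)).length = res.length := by
        rw [hset]; simp
      obtain ⟨ih1, ih2⟩ := ih (PySem.List.pySetD res i (v i))
        (by intro k hk; rw [hlen2]; exact hr k (List.mem_cons_of_mem _ hk))
      refine ⟨by rw [List.foldl_cons, ih1, hlen2], ?_⟩
      intro j
      rw [List.foldl_cons, ih2 j]
      by_cases hjr : (j : Int) ∈ rest
      · simp [hjr]
      · by_cases hji : (j : Int) = i
        · have hjn : i.toNat = j := by omega
          have hjl : j < res.length := by omega
          rw [if_neg hjr, if_pos (List.mem_cons.mpr (Or.inl hji)), hset, hjn,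
            List.getElem?_set_self hjl]
          rw [← hji]
          rfl
        · rw [if_neg hjr,
            if_neg (by intro hmem; rcases List.mem_cons.mp hmem with h | h <;> [exact hji h; exact hjr h]),
            hset, List.getElem?_set_ne (by omega)]

-- main sweep invariant: the triple-state fold equals a pure scatter of pvVal
lemma pv_main (calls intervals : List (Int × Int)) :
    ∀ (order : List Int) (p : Int × Int → Bool) (res : List Int),
      order.Pairwise (fun a b => pvKey intervals a ≤ pvKey intervals b) →
      (∀ i ∈ order, ∀ c, p c = true → c.1 < pvKey intervals i) →
      (order.foldl (pvStep intervals)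
        ((PySem.List.sorted calls (fun c => c.1) false).dropWhile p,
         ((PySem.List.sorted calls (fun c => c.1) false).takeWhile p).map (fun c => c.1 + c.2),
         res)).2.2
      = order.foldl (fun r i => PySem.List.pySetD r i (pvVal calls intervals i)) res := by
  intro order
  induction order with
  | nil => intro p res _ _; rfl
  | cons i rest ih =>
      intro p res hpw hbound
      rw [List.pairwise_cons] at hpw
      have hpq : ∀ x, p x = true →
          (fun c : Int × Int => decide (c.1 < (PySem.List.pyGetD intervals i (0, 0)).1 +
            (PySem.List.pyGetD intervals i (0, 0)).2)) x = true := by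
        intro x hx
        have h := hbound i (by simp) x hx
        simp only [pvKey] at h
        simpa using h
      have hsw := pvSweep_spec ((PySem.List.pyGetD intervals i (0, 0)).1 +
          (PySem.List.pyGetD intervals i (0, 0)).2)
        ((PySem.List.sorted calls (fun c => c.1) false).dropWhile p)
        (((PySem.List.sorted calls (fun c => c.1) false).takeWhile p).map (fun c => c.1 + c.2))
      rw [← pv_dropWhile_split p _ hpq, ← List.map_append, ← pv_takeWhile_split p _ hpq] at hsw
      have hval : (((PySem.List.sorted calls (fun c => c.1) false).takeWhile
            (fun c => decide (c.1 < (PySem.List.pyGetD intervals i (0, 0)).1 +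
              (PySem.List.pyGetD intervals i (0, 0)).2))).map (fun c => c.1 + c.2)).foldl
          (fun acc x => if x > (PySem.List.pyGetD intervals i (0, 0)).1 then acc + 1 else acc) (0 : Int)
          = pvVal calls intervals i := by
        rw [PySem.List.foldl_ite_add_one]
        simp only [pvVal, zero_add]
      have hstep : pvStep intervals
            ((PySem.List.sorted calls (fun c => c.1) false).dropWhile p,
             ((PySem.List.sorted calls (fun c => c.1) false).takeWhile p).map (fun c => c.1 + c.2),
             res) i
          = ((PySem.List.sorted calls (fun c => c.1) false).dropWhile
               (fun c => decide (c.1 < (PySem.List.pyGetD intervals i (0, 0)).1 +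
                 (PySem.List.pyGetD intervals i (0, 0)).2)),
             ((PySem.List.sorted calls (fun c => c.1) false).takeWhile
               (fun c => decide (c.1 < (PySem.List.pyGetD intervals i (0, 0)).1 +
                 (PySem.List.pyGetD intervals i (0, 0)).2))).map (fun c => c.1 + c.2),
             PySem.List.pySetD res i (pvVal calls intervals i)) := by
        unfold pvStep
        simp only [hsw, hval]
      rw [List.foldl_cons, List.foldl_cons, hstep]
      exact ih (fun c => decide (c.1 < (PySem.List.pyGetD intervals i (0, 0)).1 +
          (PySem.List.pyGetD intervals i (0, 0)).2))
        (PySem.List.pySetD res i (pvVal calls intervals i)) hpw.2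
        (by intro k hk c hc
            have h1 : c.1 < pvKey intervals i := by
              simp only [pvKey]
              simpa using hc
            have h2 := hpw.1 k hk
            omega)

-- B's stored value is A's per-interval count
lemma pv_val_eq (calls intervals : List (Int × Int)) (j : Nat) (hj : j < intervals.length) :
    pvVal calls intervals (j : Int)
      = calls.foldl (fun count c =>
          if c.1 < intervals[j].1 + intervals[j].2 ∧ c.1 + c.2 > intervals[j].1
          then count + 1 else count) 0 := by
  have hiv : PySem.List.pyGetD intervals (j : Int) (0, 0) = intervals[j] := by
    rw [PySem.List.pyGetD_natCast, List.getD_eq_getElem _ _ hj]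
  rw [PySem.List.foldl_ite_add_one]
  simp only [pvVal, hiv, zero_add]
  rw [pv_takeWhile_eq_filter _ _ (PySem.List.sorted_pairwise calls (fun c => c.1)),
    List.countP_map, List.countP_filter,
    List.Perm.countP_eq _ (PySem.List.sorted_perm calls (fun c => c.1) false)]
  congr 1
  apply List.countP_congr
  intro c _
  simp only [Function.comp, decide_eq_true_eq, Bool.and_eq_true]
  constructor
  · rintro ⟨h1, h2⟩; omega
  · rintro ⟨h1, h2⟩; omega

-- ===== VERDICT (by name: the statement is the Claim_ definition above) =====
theorem process_test_case_spec : Claim_equal_process_test_case := by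
  intro calls intervals _
  unfold Spec_process_test_case
  simp only [process_test_case, process_test_case_alt]
  rw [PySem.List.foldl_append_singleton_eq_map]
  simp only [List.nil_append]
  have hpw : (PySem.List.sorted (PySem.List.pyRange 0 intervals.length 1)
      (fun i => (PySem.List.pyGetD intervals i (0, 0)).1 + (PySem.List.pyGetD intervals i (0, 0)).2)
      false).Pairwise (fun a b => pvKey intervals a ≤ pvKey intervals b) :=
    PySem.List.sorted_pairwise (PySem.List.pyRange 0 intervals.length 1)
      (fun i => (PySem.List.pyGetD intervals i (0, 0)).1 + (PySem.List.pyGetD intervals i (0, 0)).2)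
  have hmem : ∀ i ∈ PySem.List.sorted (PySem.List.pyRange 0 intervals.length 1)
      (fun i => (PySem.List.pyGetD intervals i (0, 0)).1 + (PySem.List.pyGetD intervals i (0, 0)).2)
      false, 0 ≤ i ∧ i < (intervals.length : Int) := by
    intro i hi
    rw [PySem.List.mem_sorted] at hi
    exact PySem.List.mem_pyRange_one.mp hi
  have hB := pv_main calls intervals
    (PySem.List.sorted (PySem.List.pyRange 0 intervals.length 1)
      (fun i => (PySem.List.pyGetD intervals i (0, 0)).1 + (PySem.List.pyGetD intervals i (0, 0)).2)
      false)
    (fun _ => false) (List.replicate intervals.length 0) hpw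
    (by intro i _ c hc; simp at hc)
  have h1 : (PySem.List.sorted calls (fun c => c.1) false).dropWhile (fun _ => false)
      = PySem.List.sorted calls (fun c => c.1) false := by simp
  have h2 : ((PySem.List.sorted calls (fun c => c.1) false).takeWhile (fun _ => false)).map
      (fun c => c.1 + c.2) = ([] : List Int) := by simp
  rw [h1, h2] at hB
  rw [hB]
  obtain ⟨hlen, hget⟩ := pv_foldl_setD_getD (pvVal calls intervals)
    (PySem.List.sorted (PySem.List.pyRange 0 intervals.length 1)
      (fun i => (PySem.List.pyGetD intervals i (0, 0)).1 + (PySem.List.pyGetD intervals i (0, 0)).2)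
      false)
    (List.replicate intervals.length 0)
    (by intro i hi; simpa using hmem i hi)
  apply List.ext_getElem
  · simp [hlen]
  · intro j hj1 hj2
    have hjn : j < intervals.length := by simpa using hj1
    have hj' : ((j : Int)) ∈ PySem.List.sorted (PySem.List.pyRange 0 intervals.length 1)
        (fun i => (PySem.List.pyGetD intervals i (0, 0)).1 + (PySem.List.pyGetD intervals i (0, 0)).2)
        false := by
      rw [PySem.List.mem_sorted, PySem.List.mem_pyRange_one]
      constructor
      · exact Int.natCast_nonneg j
      · exact_mod_cast hjn
    have := hget j
    rw [if_pos hj', List.getElem?_eq_getElem hj2] at this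
    simp only [Option.getD_some] at this
    rw [this, List.getElem_map, pv_val_eq calls intervals j hjn]
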